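-- pv_equiv track=rewrite | github.com/d0tTino/GeneCoder | src/genecoder/error_detection.py | add_parity_to_sequence
-- ===== SOURCE A (Python) =====
-- from typing import List, Tuple
--
-- PARITY_RULE_GC_EVEN_A_ODD_T = "GC_even_A_odd_T"
--
-- def _calculate_gc_parity(dna_block: str) -> str:
--     """Calculates a parity nucleotide for a DNA block based on G/C count.
--
--     This is a helper for the "GC_even_A_odd_T" parity rule.
--
--     Args:
--         dna_block (str): A block of DNA nucleotides.
--
--     Returns:
--         str: 'A' if the sum of 'G' and 'C' counts is even, 'T' if odd.
--     """
--     gc_count = dna_block.count('G') + dna_block.count('C')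
--     if gc_count % 2 == 0:
--         return 'A'  # Even GC count
--     else:
--         return 'T'  # Odd GC count
--
-- def add_parity_to_sequence(dna_sequence: str, k_value: int, rule: str) -> str:
--     """Adds parity nucleotides to a DNA sequence based on a specified rule.
--
--     The DNA sequence is divided into blocks of `k_value` nucleotides.
--     A parity nucleotide is calculated for each block and appended to it.
--
--     Args:
--         dna_sequence (str): The original DNA sequence.
--         k_value (int): The size of each data block before adding a parity bit.
--                        Must be a positive integer.
--         rule (str): The parity rule identifier to use. Currently supports
--                     `PARITY_RULE_GC_EVEN_A_ODD_T`.
--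
--     Returns:
--         str: The DNA sequence with interleaved parity nucleotides. Each original
--              block of `k_value` nucleotides is followed by one parity nucleotide.
--
--     Raises:
--         ValueError: If `k_value` is not a positive integer.
--         NotImplementedError: If the specified `rule` is not recognized.
--     """
--     if not isinstance(k_value, int) or k_value <= 0:
--         raise ValueError("k_value must be a positive integer.")
--
--     if not dna_sequence: # If original sequence is empty, return empty
--         return ""
--
--     sequence_with_parity_parts: List[str] = []
--
--     for i in range(0, len(dna_sequence), k_value):
--         data_block = dna_sequence[i:i + k_value]
--         parity_nt: str
--         if rule == PARITY_RULE_GC_EVEN_A_ODD_T: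
--             parity_nt = _calculate_gc_parity(data_block)
--         else:
--             raise NotImplementedError(f"Parity rule '{rule}' is not implemented.")
--
--         sequence_with_parity_parts.append(data_block)
--         sequence_with_parity_parts.append(parity_nt)
--
--     return "".join(sequence_with_parity_parts)
-- ===== SOURCE B (Python) =====
-- PARITY_RULE_GC_EVEN_A_ODD_T = "GC_even_A_odd_T"
--
-- def add_parity_to_sequence(dna_sequence: str, k_value: int, rule: str) -> str:
--     """Single left-to-right pass: accumulate a block buffer and a running GC
--     parity flag, flushing block+parity each time the buffer reaches k_value."""
--     if not isinstance(k_value, int) or k_value <= 0: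
--         raise ValueError("k_value must be a positive integer.")
--     if not dna_sequence:
--         return ""
--     if rule != PARITY_RULE_GC_EVEN_A_ODD_T:
--         raise NotImplementedError(f"Parity rule '{rule}' is not implemented.")
--     out = []
--     buf = []
--     parity = False
--     for ch in dna_sequence:
--         buf.append(ch)
--         if ch == 'G' or ch == 'C':
--             parity = not parity
--         if len(buf) == k_value:
--             out.append(''.join(buf))
--             out.append('T' if parity else 'A')
--             buf = []
--             parity = False
--     if buf:
--         out.append(''.join(buf))
--         out.append('T' if parity else 'A')
--     return ''.join(out)
-- ===== Notes on version B (the rewrite author's own statement) =====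
-- stated objective: alternative
-- what changed: Replaces the range/slice decomposition (slice each k-block, recount G and C in it) with a single character-level pass that maintains a block buffer and a running GC-parity flag toggled on each G/C, flushing block+parity whenever the buffer fills; the per-block count() rescans disappear.
import Mathlib
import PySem

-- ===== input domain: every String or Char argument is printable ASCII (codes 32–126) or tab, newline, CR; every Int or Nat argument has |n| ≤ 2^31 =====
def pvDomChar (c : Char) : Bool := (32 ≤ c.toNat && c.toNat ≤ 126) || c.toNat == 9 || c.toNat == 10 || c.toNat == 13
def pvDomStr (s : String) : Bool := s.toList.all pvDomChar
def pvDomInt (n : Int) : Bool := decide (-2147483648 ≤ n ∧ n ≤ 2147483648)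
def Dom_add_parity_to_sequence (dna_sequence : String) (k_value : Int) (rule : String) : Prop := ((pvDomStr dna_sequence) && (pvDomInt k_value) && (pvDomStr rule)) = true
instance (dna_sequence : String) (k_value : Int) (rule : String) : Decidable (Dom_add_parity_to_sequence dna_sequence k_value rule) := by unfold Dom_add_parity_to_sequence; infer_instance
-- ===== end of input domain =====

-- B replaces A's range/slice block decomposition (recounting G/C per block) by a single
-- character-level pass with a block buffer and a running GC-parity flag (alternative decomposition).


-- ===== PORT A =====
-- _calculate_gc_parity
def pvCalcGCParity (dna_block : List Char) : Char :=
  let gc_count := PySem.Chars.count dna_block ['G'] + PySem.Chars.count dna_block ['C']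
  if gc_count % 2 == 0 then 'A' else 'T'

def add_parity_to_sequence (dna_sequence : String) (k_value : Int) (rule : String) : String :=
  if k_value ≤ 0 then ""                               -- Python raises ValueError here (outside Pre_)
  else if dna_sequence.toList.isEmpty then ""
  else
    let cs := dna_sequence.toList
    let parts := (PySem.List.pyRange 0 (cs.length : Int) k_value).foldl
      (fun acc i =>
        let data_block := PySem.List.slice cs (some i) (some (i + k_value))
        let parity_nt := if rule == "GC_even_A_odd_T" then pvCalcGCParity data_block
                         else '?'                      -- Python raises NotImplementedError here (outside Pre_)
        acc ++ [data_block, [parity_nt]]) []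
    String.ofList (PySem.Chars.join [] parts)          -- "".join(parts)

-- ===== PORT B =====
def pvToggleGC (p : Bool) (c : Char) : Bool := if c == 'G' || c == 'C' then !p else p

def pvParityChar (p : Bool) : Char := if p then 'T' else 'A'

-- the body of B's single for-loop: extend the buffer, toggle parity on G/C, flush a full block
def pvStep (k : Int) (st : List Char × List Char × Bool) (ch : Char) : List Char × List Char × Bool :=
  let buf := st.2.1 ++ [ch]
  let parity := pvToggleGC st.2.2 ch
  if (buf.length : Int) == k then (st.1 ++ buf ++ [pvParityChar parity], [], false)
  else (st.1, buf, parity)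

-- B's trailing flush: 'if buf: out += buf + parity'
def pvFinish (st : List Char × List Char × Bool) : List Char :=
  if st.2.1.isEmpty then st.1 else st.1 ++ st.2.1 ++ [pvParityChar st.2.2]

def add_parity_to_sequence_alt (dna_sequence : String) (k_value : Int) (rule : String) : String :=
  if k_value ≤ 0 then ""                               -- Python raises ValueError here (outside Pre_)
  else if dna_sequence.toList.isEmpty then ""
  else if !(rule == "GC_even_A_odd_T") then ""         -- Python raises NotImplementedError here (outside Pre_)
  else
    String.ofList (pvFinish (dna_sequence.toList.foldl (pvStep k_value) ([], [], false)))

-- ===== PRECONDITION & SPEC =====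
-- Pre_ excludes exactly the inputs on which A raises: k_value ≤ 0 (ValueError) and an
-- unrecognized rule with a non-empty sequence (NotImplementedError).
def Pre_add_parity_to_sequence (dna_sequence : String) (k_value : Int) (rule : String) : Prop :=
  0 < k_value ∧ (dna_sequence.toList = [] ∨ rule = "GC_even_A_odd_T")
instance (dna_sequence : String) (k_value : Int) (rule : String) : Decidable (Pre_add_parity_to_sequence dna_sequence k_value rule) := by unfold Pre_add_parity_to_sequence; infer_instance

def pvWitness_add_parity_to_sequence : String × Int × String := ("GATC", 2, "GC_even_A_odd_T")

def Spec_add_parity_to_sequence (dna_sequence : String) (k_value : Int) (rule : String) (out : String) : Prop := out = add_parity_to_sequence_alt dna_sequence k_value rule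
instance (dna_sequence : String) (k_value : Int) (rule : String) (out : String) : Decidable (Spec_add_parity_to_sequence dna_sequence k_value rule out) := by unfold Spec_add_parity_to_sequence; infer_instance

-- ===== CLAIM (what is proved, stated in full; the proofs are below) =====
def Claim_equal_add_parity_to_sequence : Prop := ∀ (dna_sequence : String) (k_value : Int) (rule : String), Dom_add_parity_to_sequence dna_sequence k_value rule → Pre_add_parity_to_sequence dna_sequence k_value rule → Spec_add_parity_to_sequence dna_sequence k_value rule (add_parity_to_sequence dna_sequence k_value rule)

-- ===== LEMMAS AND PROOFS =====

-- the common normal form: the sequence cut into blocks of km1+1 chars, each followed by its parity char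
def pvChunks (km1 : Nat) : List Char → List Char
  | [] => []
  | c :: rest =>
      (c :: rest.take km1) ++ pvCalcGCParity (c :: rest.take km1) :: pvChunks km1 (rest.drop km1)
termination_by cs => cs.length
decreasing_by simp

theorem pvChunks_cons (km1 : Nat) (c : Char) (rest : List Char) :
    pvChunks km1 (c :: rest) =
      (c :: rest.take km1) ++ pvCalcGCParity (c :: rest.take km1) :: pvChunks km1 (rest.drop km1) := by
  conv_lhs => rw [pvChunks]

-- str.count with a single-character needle is List.count
theorem pvCountGo_singleton (c : Char) : ∀ (fuel : Nat) (cs : List Char) (acc : Nat), cs.length ≤ fuel →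
    PySem.Chars.count.go [c] fuel cs acc = acc + cs.count c := by
  intro fuel
  induction fuel with
  | zero => intro cs acc h; rw [List.length_eq_zero_iff.mp (Nat.le_zero.mp h)]; rfl
  | succ f ih =>
    intro cs acc h
    cases cs with
    | nil => rfl
    | cons x t =>
      rw [PySem.Chars.count.go]
      by_cases hc : c = x
      · subst hc
        simp only [List.isPrefixOf, BEq.rfl, Bool.true_and, if_true]
        rw [show List.drop [c].length (c :: t) = t from rfl]
        rw [ih t (acc+1) (by simpa using h)]
        simp
        omega
      · have hp : ([c].isPrefixOf (x :: t)) = false := by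
          simp only [List.isPrefixOf, Bool.and_true, beq_eq_false_iff_ne]
          · exact fun hh => hc hh
        rw [hp]
        simp only [Bool.false_eq_true, if_false]
        rw [ih t acc (by simpa using h)]
        have hxc : x ≠ c := fun hh => hc hh.symm
        simp [hxc]

theorem pvCount_singleton (c : Char) (cs : List Char) : PySem.Chars.count cs [c] = cs.count c := by
  simp [PySem.Chars.count, pvCountGo_singleton c cs.length cs 0 le_rfl]

-- the running-parity flag computes the GC-count parity
def pvParB (cs : List Char) : Bool := cs.foldl pvToggleGC false

theorem pvFoldl_toggle (cs : List Char) (p : Bool) :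
    cs.foldl pvToggleGC p = xor p (pvParB cs) := by
  induction cs generalizing p with
  | nil => simp [pvParB]
  | cons x t ih =>
    simp only [pvParB, List.foldl_cons] at *
    rw [ih (pvToggleGC p x), ih (pvToggleGC false x)]
    cases p <;> simp [pvToggleGC] <;> by_cases hg : x = 'G' <;> by_cases hc : x = 'C' <;> simp [hg, hc]

theorem pvParB_count (cs : List Char) :
    pvParB cs = ((cs.count 'G' + cs.count 'C') % 2 == 1) := by
  induction cs with
  | nil => simp [pvParB]
  | cons x t ih =>
    have h1 : pvParB (x :: t) = xor (pvToggleGC false x) (pvParB t) := by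
      simp only [pvParB, List.foldl_cons]; exact pvFoldl_toggle t _
    rw [h1, ih]
    by_cases hx : x = 'G' ∨ x = 'C'
    · have hg : pvToggleGC false x = true := by
        rcases hx with h | h <;> simp [pvToggleGC, h]
      have hcnt : (x :: t).count 'G' + (x :: t).count 'C' = (t.count 'G' + t.count 'C') + 1 := by
        rcases hx with h | h <;> subst h <;> simp <;> omega
      rw [hg, hcnt]
      rcases Nat.even_or_odd (t.count 'G' + t.count 'C') with he | ho
      · simp [Nat.even_iff.mp he, Nat.succ_mod_two_eq_one_iff.mpr (Nat.even_iff.mp he)]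
      · simp [Nat.odd_iff.mp ho, Nat.succ_mod_two_eq_zero_iff.mpr (Nat.odd_iff.mp ho)]
    · push Not at hx
      have hg : pvToggleGC false x = false := by
        simp [pvToggleGC, hx.1, hx.2]
      have hcnt : (x :: t).count 'G' + (x :: t).count 'C' = t.count 'G' + t.count 'C' := by
        simp [hx.1, hx.2]
      rw [hg, hcnt]; simp

theorem pvParityChar_parB (cs : List Char) : pvParityChar (pvParB cs) = pvCalcGCParity cs := by
  rw [pvParB_count]
  simp only [pvCalcGCParity, pvParityChar, pvCount_singleton]
  rcases Nat.even_or_odd (cs.count 'G' + cs.count 'C') with he | ho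
  · simp [Nat.even_iff.mp he]
  · simp [Nat.odd_iff.mp ho]

theorem pvParB_snoc (buf : List Char) (ch : Char) :
    pvParB (buf ++ [ch]) = pvToggleGC (pvParB buf) ch := by
  simp [pvParB]

-- B's loop on a strict prefix of a block: the buffer only grows
theorem pvRun_partial (k : Int) : ∀ (b buf out : List Char),
    ((buf.length + b.length : Nat) : Int) < k →
    b.foldl (pvStep k) (out, buf, pvParB buf) = (out, buf ++ b, pvParB (buf ++ b)) := by
  intro b
  induction b with
  | nil => intro buf out h; simp
  | cons ch b ih =>
    intro buf out h
    rw [List.foldl_cons]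
    have hne : ¬ ((buf.length : Int) + 1 = k) := by simp at h; omega
    have hstep : pvStep k (out, buf, pvParB buf) ch = (out, buf ++ [ch], pvParB (buf ++ [ch])) := by
      simp [pvStep, hne, pvParB_snoc]
    rw [hstep, ih (buf ++ [ch]) out (by simp at h ⊢; omega)]
    simp

-- B's loop on the remainder of exactly one block: flushes block + parity char
theorem pvRun_flush (k : Int) : ∀ (b buf out : List Char), b ≠ [] →
    ((buf.length + b.length : Nat) : Int) = k →
    b.foldl (pvStep k) (out, buf, pvParB buf) =
      (out ++ (buf ++ b) ++ [pvParityChar (pvParB (buf ++ b))], [], false) := by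
  intro b
  induction b with
  | nil => intro buf out h; exact absurd rfl h
  | cons ch b ih =>
    intro buf out _ hlen
    rw [List.foldl_cons]
    cases b with
    | nil =>
      have heq : ((buf.length : Int) + 1 = k) := by simp at hlen; omega
      have hstep : pvStep k (out, buf, pvParB buf) ch =
          (out ++ (buf ++ [ch]) ++ [pvParityChar (pvParB (buf ++ [ch]))], [], false) := by
        simp [pvStep, heq, pvParB_snoc]
      rw [hstep]; simp
    | cons ch2 b2 =>
      have hne : ¬ ((buf.length : Int) + 1 = k) := by simp at hlen; omega
      have hstep : pvStep k (out, buf, pvParB buf) ch = (out, buf ++ [ch], pvParB (buf ++ [ch])) := by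
        simp [pvStep, hne, pvParB_snoc]
      rw [hstep, ih (buf ++ [ch]) out (by simp) (by simp at hlen ⊢; omega)]
      simp

-- B's whole pass produces the chunked normal form
theorem pvRun (k : Int) (hk : 0 < k) : ∀ (n : Nat) (cs : List Char), cs.length = n → ∀ (out : List Char),
    pvFinish (cs.foldl (pvStep k) (out, [], false)) = out ++ pvChunks (k.toNat - 1) cs := by
  intro n
  induction n using Nat.strong_induction_on with
  | _ n ih =>
    intro cs hn out
    cases cs with
    | nil => simp [pvFinish, pvChunks]
    | cons c rest =>
      have h0 : (false : Bool) = pvParB [] := rfl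
      by_cases hlt : (((c :: rest).length : Nat) : Int) < k
      · rw [h0, pvRun_partial k (c :: rest) [] out (by simpa using hlt)]
        have hrt : rest.take (k.toNat - 1) = rest := by
          apply List.take_of_length_le; simp at hlt; omega
        have hrd : rest.drop (k.toNat - 1) = [] := by
          apply List.drop_eq_nil_of_le; simp at hlt; omega
        rw [pvChunks_cons, hrt, hrd]
        simp [pvFinish, pvChunks, ← pvParityChar_parB]
      · have hk1 : 1 ≤ k.toNat := by omega
        have hkn : k.toNat = (k.toNat - 1) + 1 := by omega
        have hlen : k.toNat ≤ (c :: rest).length := by simp at hlt ⊢; omega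
        have hsplit : c :: rest = (c :: rest).take k.toNat ++ (c :: rest).drop k.toNat :=
          (List.take_append_drop _ _).symm
        conv_lhs => rw [hsplit]
        rw [List.foldl_append, h0,
          pvRun_flush k ((c :: rest).take k.toNat) [] out
            (by rw [hkn]; simp) (by simp at hlt; simp [List.length_take]; omega)]
        subst hn
        rw [ih ((c :: rest).drop k.toNat).length (by simp; omega) ((c :: rest).drop k.toNat) rfl]
        rw [pvChunks_cons]
        rw [hkn, List.take_succ_cons, List.drop_succ_cons]
        simp [← pvParityChar_parB]

-- A's block count: ceil(n / kn)
def pvCeil (n kn : Nat) : Nat := (n + kn - 1) / kn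

theorem pvCeil_succ (n kn : Nat) (hk : 0 < kn) (hn : 0 < n) :
    pvCeil n kn = pvCeil (n - kn) kn + 1 := by
  unfold pvCeil
  rcases Nat.lt_or_ge kn n with h | h
  · have h1 : n + kn - 1 = (n - kn + kn - 1) + kn := by omega
    rw [h1, Nat.add_div_right _ hk]
  · have h1 : n - kn = 0 := by omega
    rw [h1]
    have h2 : (n + kn - 1) / kn = 1 := by
      rw [Nat.div_eq_iff (by omega)]; omega
    have h3 : (0 + kn - 1) / kn = 0 := Nat.div_eq_of_lt (by omega)
    omega

-- A's per-block flatMap produces the same chunked normal form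
theorem pvA_flatMap (kn : Nat) (hk : 0 < kn) : ∀ (n : Nat) (cs : List Char), cs.length = n →
    (List.range (pvCeil cs.length kn)).flatMap
      (fun j => ((cs.drop (kn*j)).take kn) ++ [pvCalcGCParity ((cs.drop (kn*j)).take kn)])
      = pvChunks (kn-1) cs := by
  intro n
  induction n using Nat.strong_induction_on with
  | _ n ih =>
    intro cs hn
    cases cs with
    | nil =>
        have hc0 : pvCeil 0 kn = 0 := by unfold pvCeil; exact Nat.div_eq_of_lt (by omega)
        simp [hc0, pvChunks]
    | cons c rest =>
      rw [pvCeil_succ _ _ hk (by simp), List.range_succ_eq_map, List.flatMap_cons]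
      simp only [Nat.mul_zero, List.drop_zero, List.flatMap_map]
      have hshift : ∀ j : Nat, (c :: rest).drop (kn * (j+1)) = ((c :: rest).drop kn).drop (kn * j) := by
        intro j
        rw [List.drop_drop]
        ring_nf
      have hbody : (fun j : Nat => (((c :: rest).drop (kn*(Nat.succ j))).take kn) ++
            [pvCalcGCParity (((c :: rest).drop (kn*(Nat.succ j))).take kn)]) =
          (fun j => ((((c :: rest).drop kn).drop (kn*j)).take kn) ++
            [pvCalcGCParity ((((c :: rest).drop kn).drop (kn*j)).take kn)]) := by
        funext j; rw [show Nat.succ j = j + 1 from rfl, hshift j]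
      have hlen : ((c :: rest).drop kn).length = (c :: rest).length - kn := by simp
      conv_lhs =>
        rw [hbody]
      rw [show pvCeil ((c :: rest).length - kn) kn = pvCeil (((c :: rest).drop kn).length) kn by rw [hlen]]
      rw [ih (((c :: rest).drop kn).length) (by simp at hn ⊢; omega) _ rfl]
      rw [pvChunks_cons]
      have hkn : kn = (kn - 1) + 1 := by omega
      rw [show (c :: rest).drop kn = rest.drop (kn - 1) by rw [hkn]; simp,
          show (c :: rest).take kn = c :: rest.take (kn - 1) by rw [hkn]; simp]
      simp

-- ''.join over char-list parts is flatten
theorem pvJoin_nil_flatten (ps : List (List Char)) : PySem.Chars.join [] ps = ps.flatten := by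
  simp [PySem.Chars.join, List.intercalate]
  induction ps with
  | nil => simp
  | cons a t ih => cases t <;> simp_all [List.intersperse]

-- flattening A's two-appends-per-iteration accumulator
theorem pvFlatten_foldl {α : Type} (f g : α → List Char) :
    ∀ (l : List α) (acc : List (List Char)),
    (l.foldl (fun a x => a ++ [f x, g x]) acc).flatten
      = acc.flatten ++ l.flatMap (fun x => f x ++ g x) := by
  intro l
  induction l with
  | nil => simp
  | cons x t ih =>
    intro acc
    rw [List.foldl_cons, ih]
    simp

-- ===== VERDICT (by name: the statement is the Claim_ definition above) =====
theorem add_parity_to_sequence_spec : Claim_equal_add_parity_to_sequence := by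
  intro s k rule _ hpre
  obtain ⟨hk, hor⟩ := hpre
  unfold Spec_add_parity_to_sequence add_parity_to_sequence add_parity_to_sequence_alt
  have hknot : ¬ (k ≤ 0) := by omega
  rw [if_neg hknot, if_neg hknot]
  by_cases hemp : s.toList.isEmpty
  · rw [if_pos hemp, if_pos hemp]
  · rw [if_neg hemp, if_neg hemp]
    have hrule : rule = "GC_even_A_odd_T" := by
      rcases hor with h | h
      · exact absurd (by simp [h] : s.toList.isEmpty = true) hemp
      · exact h
    rw [if_neg (by simp [hrule])]
    have hne : s.toList ≠ [] := by simpa [List.isEmpty_iff] using hemp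
    have hkk : ((k.toNat : Nat) : Int) = k := by omega
    rw [pvRun k hk s.toList.length s.toList rfl [], List.nil_append]
    dsimp only
    rw [pvJoin_nil_flatten]
    rw [PySem.List.pyRange_of_pos 0 (s.toList.length : Int) hk]
    rw [List.foldl_map]
    simp only [hrule, beq_self_eq_true, if_true]
    rw [pvFlatten_foldl
      (fun j : Nat => PySem.List.slice s.toList (some (0 + k * (j:Int))) (some (0 + k * (j:Int) + k)))
      (fun j : Nat => [pvCalcGCParity (PySem.List.slice s.toList (some (0 + k * (j:Int))) (some (0 + k * (j:Int) + k)))])]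
    rw [List.flatten_nil, List.nil_append]
    have hslice : ∀ j : Nat, PySem.List.slice s.toList (some (0 + k * (j:Int))) (some (0 + k * (j:Int) + k))
        = (s.toList.drop (k.toNat * j)).take k.toNat := by
      intro j
      have h1 : (0 : Int) + k * (j:Int) = ((k.toNat * j : Nat) : Int) := by
        push_cast [Int.toNat_of_nonneg hk.le]; ring
      have h2 : (0 : Int) + k * (j:Int) + k = ((k.toNat * j : Nat) : Int) + ((k.toNat : Nat) : Int) := by
        push_cast [Int.toNat_of_nonneg hk.le]; ring
      rw [h2, h1, PySem.List.slice_natCast_add]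
    simp only [hslice]
    have hM : (if (0:Int) < (s.toList.length : Int)
          then (((s.toList.length : Int) - 0 + k - 1) / k).toNat else 0)
        = pvCeil s.toList.length k.toNat := by
      rw [if_pos (by exact_mod_cast List.length_pos_iff.mpr hne)]
      rw [← hkk]
      have hcast : ((s.toList.length : Int) - 0 + ((k.toNat : Nat) : Int) - 1)
          = ((s.toList.length + k.toNat - 1 : Nat) : Int) := by
        push_cast [Nat.cast_sub (show 1 ≤ s.toList.length + k.toNat by omega)]; ring
      rw [hcast, ← Int.natCast_div, Int.toNat_natCast]
      rfl
    rw [hM]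
    exact congrArg String.ofList (pvA_flatMap k.toNat (by omega) s.toList.length s.toList rfl)
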